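-- pv_equiv track=rewrite | github.com/iii-org/devops-system | apis/util.py | decode_k8s_sa
-- ===== SOURCE A (Python) =====
-- def merge_zero(c):
--     if c == '0':
--         return '0'
--     elif c == '-':
--         return '_'
--     else:
--         return c.upper()
--
-- def decode_k8s_sa(string):
--     ret = ''
--     i = 0
--     while i < len(string):
--         c = string[i]
--         if i == len(string) - 1:
--             ret += c
--             i += 1
--             continue
--         n = string[i + 1]
--         if n == '0':
--             nn = i + 2
--             zero_count = 1
--             while nn < len(string):
--                 if string[nn] == '0':
--                     nn += 1
--                     zero_count += 1
--                 else:
--                     break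
--             if zero_count % 2 == 1:
--                 ret += merge_zero(c)
--                 i += 2
--                 zero_count -= 1
--             else:
--                 ret += c
--                 i += 1
--             for _ in range(0, int(zero_count / 2)):
--                 ret += '0'
--                 i += 2
--         else:
--             ret += c
--             i += 1
--     return ret
-- ===== SOURCE B (Python) =====
-- import re
--
-- def merge_zero(c):
--     if c == '0':
--         return '0'
--     elif c == '-':
--         return '_'
--     else:
--         return c.upper()
--
-- def decode_k8s_sa(string):
--     parts = []
--     for c, zeros in re.findall(r'(.)(0*)', string, flags=re.DOTALL):
--         k = len(zeros)
--         parts.append((merge_zero(c) if k % 2 == 1 else c) + '0' * (k // 2))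
--     return ''.join(parts)
-- ===== Notes on version B (the rewrite author's own statement) =====
-- stated objective: simpler
-- what changed: Replaces A's stateful index walk with nested zero-counting and re-scanning by a two-phase decomposition: tokenize the string once into (char, zero-run) pairs with a regex, then one mapping pass that emits merge_zero(c) or c plus half the zeros per token, joined at the end.
import Mathlib
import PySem

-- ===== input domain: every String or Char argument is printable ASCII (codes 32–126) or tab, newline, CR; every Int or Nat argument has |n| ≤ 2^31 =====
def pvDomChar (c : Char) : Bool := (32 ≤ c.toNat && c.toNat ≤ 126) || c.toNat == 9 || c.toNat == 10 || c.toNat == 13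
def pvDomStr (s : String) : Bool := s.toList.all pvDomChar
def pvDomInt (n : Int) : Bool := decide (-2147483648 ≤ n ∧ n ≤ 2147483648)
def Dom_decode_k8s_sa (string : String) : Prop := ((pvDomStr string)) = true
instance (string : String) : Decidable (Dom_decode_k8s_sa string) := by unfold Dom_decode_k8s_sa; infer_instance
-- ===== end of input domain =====

-- B replaces A's nested index-walk by a tokenize-then-map pass (simpler decomposition); same result.

-- ===== PORT A =====
def mergeZeroA (c : Char) : List Char :=
  if c = '0' then ['0']
  else if c = '-' then ['_']
  else [PySem.Chars.upperChar c]

-- inner "while nn < len(string): if string[nn] == '0' …" counting the zero run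
-- (fuel = an upper bound on the remaining iterations, only to make the recursion structural; called with fuel = len(string))
def innerZerosA : Nat → List Char → Nat → Nat → Nat
  | 0, _, _, zc => zc
  | fuel + 1, s, nn, zc =>
      if h : nn < s.length then
        if s[nn] = '0' then innerZerosA fuel s (nn + 1) (zc + 1) else zc
      else zc

-- the "for _ in range(0, zc // 2): ret += '0'" loop of A
def zeroLoopA (n : Nat) (ret : List Char) : List Char :=
  (List.range n).foldl (fun r _ => r ++ ['0']) ret

-- A's outer while loop over the index i (the i += 2 of the for-loop folded into the new index;
-- fuel bounds the remaining iterations — i strictly increases, so fuel = len(string) suffices)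
def loopA : Nat → List Char → Nat → List Char → List Char
  | 0, _, _, ret => ret
  | fuel + 1, s, i, ret =>
      if h : i < s.length then
        let c := s[i]
        if hlast : i = s.length - 1 then
          loopA fuel s (i + 1) (ret ++ [c])
        else
          have h2 : i + 1 < s.length := by omega
          let n := s[i + 1]'h2
          if hz : n = '0' then
            let zc := innerZerosA s.length s (i + 2) 1
            if hodd : zc % 2 = 1 then
              loopA fuel s (i + 2 + 2 * ((zc - 1) / 2)) (zeroLoopA ((zc - 1) / 2) (ret ++ mergeZeroA c))
            else
              loopA fuel s (i + 1 + 2 * (zc / 2)) (zeroLoopA (zc / 2) (ret ++ [c]))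
          else
            loopA fuel s (i + 1) (ret ++ [c])
      else ret

def decode_k8s_sa (string : String) : String :=
  String.ofList (loopA string.toList.length string.toList 0 [])

-- ===== PORT B =====
def mergeZeroB (c : Char) : List Char :=
  if c = '0' then ['0']
  else if c = '-' then ['_']
  else [PySem.Chars.upperChar c]

-- hand port of re.findall(r'(.)(0*)', string, re.DOTALL): pair every char with its following zero run
def countLeadingZeros : List Char → Nat
  | [] => 0
  | c :: rest => if c = '0' then countLeadingZeros rest + 1 else 0

-- (fuel only makes the recursion structural; called with fuel = the list length, an upper bound on the token count)
def tokensBF : Nat → List Char → List (Char × Nat)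
  | 0, _ => []
  | _ + 1, [] => []
  | fuel + 1, c :: rest =>
      let k := countLeadingZeros rest
      (c, k) :: tokensBF fuel (rest.drop k)

def tokensB (l : List Char) : List (Char × Nat) := tokensBF l.length l

def pieceB (t : Char × Nat) : List Char :=
  (if t.2 % 2 = 1 then mergeZeroB t.1 else [t.1]) ++ List.replicate (t.2 / 2) '0'

def decode_k8s_sa_alt (string : String) : String :=
  String.ofList (((tokensB string.toList).map pieceB).flatten)

-- ===== PRECONDITION & SPEC =====
def Spec_decode_k8s_sa (string : String) (out : String) : Prop := out = decode_k8s_sa_alt string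
instance (string : String) (out : String) : Decidable (Spec_decode_k8s_sa string out) := by unfold Spec_decode_k8s_sa; infer_instance

-- ===== CLAIM (what is proved, stated in full; the proofs are below) =====
def Claim_equal_decode_k8s_sa : Prop := ∀ (string : String), Dom_decode_k8s_sa string → Spec_decode_k8s_sa string (decode_k8s_sa string)

-- ===== LEMMAS AND PROOFS =====
lemma mergeZero_eq (c : Char) : mergeZeroA c = mergeZeroB c := rfl

lemma zeroLoopA_eq (n : Nat) (ret : List Char) :
    zeroLoopA n ret = ret ++ List.replicate n '0' := by
  induction n with
  | zero => simp [zeroLoopA]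
  | succ m ih =>
      simp [zeroLoopA, List.range_succ, List.foldl_append] at *
      simp [List.replicate_succ']

lemma innerZerosA_eq (fuel : Nat) (s : List Char) (nn zc : Nat) (hf : s.length ≤ nn + fuel) :
    innerZerosA fuel s nn zc = zc + countLeadingZeros (s.drop nn) := by
  induction fuel generalizing nn zc with
  | zero =>
      rw [innerZerosA, List.drop_eq_nil_of_le (by omega)]
      simp [countLeadingZeros]
  | succ f ih =>
      rw [innerZerosA]
      by_cases h : nn < s.length
      · rw [dif_pos h, List.drop_eq_getElem_cons h]
        by_cases hz : s[nn] = '0'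
        · rw [if_pos hz, ih (nn + 1) (zc + 1) (by omega)]
          simp [countLeadingZeros, hz]; omega
        · rw [if_neg hz]
          simp [countLeadingZeros, hz]
      · rw [dif_neg h, List.drop_eq_nil_of_le (by omega)]
        simp [countLeadingZeros]

lemma tokensBF_fuel (fuel : Nat) : ∀ (l : List Char), l.length ≤ fuel → tokensBF fuel l = tokensB l := by
  induction fuel using Nat.strong_induction_on with
  | _ fuel ih =>
    intro l hf
    cases fuel with
    | zero =>
        have : l = [] := List.length_eq_zero_iff.mp (by omega)
        subst this; rfl
    | succ f =>
        cases l with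
        | nil => rfl
        | cons c rest =>
            simp only [List.length_cons] at hf
            have hlen : (rest.drop (countLeadingZeros rest)).length ≤ rest.length := by
              simp [List.length_drop]
            rw [tokensBF, tokensB, List.length_cons, tokensBF,
              ih f (by omega) (rest.drop (countLeadingZeros rest)) (by omega),
              ih rest.length (by omega) (rest.drop (countLeadingZeros rest)) hlen]

lemma tokensB_cons (c : Char) (t : List Char) :
    tokensB (c :: t) = (c, countLeadingZeros t) :: tokensB (t.drop (countLeadingZeros t)) := by
  rw [tokensB, List.length_cons, tokensBF,
    tokensBF_fuel t.length (t.drop (countLeadingZeros t)) (by simp [List.length_drop])]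

lemma loopA_eq (fuel : Nat) (s : List Char) (i : Nat) (ret : List Char)
    (hf : s.length ≤ i + fuel) :
    loopA fuel s i ret = ret ++ ((tokensB (s.drop i)).map pieceB).flatten := by
  induction fuel generalizing i ret with
  | zero =>
      rw [loopA, List.drop_eq_nil_of_le (by omega)]
      simp [tokensB, tokensBF]
  | succ f ih =>
      rw [loopA]
      by_cases h : i < s.length
      · rw [dif_pos h]
        by_cases hlast : i = s.length - 1
        · rw [dif_pos hlast]
          rw [ih (i + 1) _ (by omega), List.drop_eq_getElem_cons h,
            List.drop_eq_nil_of_le (by omega)]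
          simp [countLeadingZeros, pieceB, tokensB, tokensBF]
        · rw [dif_neg hlast]
          have h2 : i + 1 < s.length := by omega
          have hd2 : s.drop (i + 1) = s[i + 1]'h2 :: s.drop (i + 2) := List.drop_eq_getElem_cons h2
          by_cases hz : s[i + 1]'h2 = '0'
          · have hk := innerZerosA_eq s.length s (i + 2) 1 (by omega)
            have hclz : countLeadingZeros (s.drop (i + 1)) = innerZerosA s.length s (i + 2) 1 := by
              rw [hd2]; simp [countLeadingZeros, hz]; omega
            rw [dif_pos hz]
            simp only []
            by_cases hodd : innerZerosA s.length s (i + 2) 1 % 2 = 1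
            · rw [dif_pos hodd, ih _ _ (by omega), zeroLoopA_eq,
                List.drop_eq_getElem_cons h, tokensB_cons, hclz]
              have hdrop : (s.drop (i + 1)).drop (innerZerosA s.length s (i + 2) 1) =
                  s.drop (i + 2 + 2 * ((innerZerosA s.length s (i + 2) 1 - 1) / 2)) := by
                rw [List.drop_drop]; congr 1; omega
              rw [hdrop, List.map_cons, List.flatten_cons, pieceB]
              simp only [if_pos hodd, mergeZero_eq]
              have hhalf : innerZerosA s.length s (i + 2) 1 / 2 =
                  (innerZerosA s.length s (i + 2) 1 - 1) / 2 := by omega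
              rw [hhalf]
              simp [List.append_assoc]
            · rw [dif_neg hodd, ih _ _ (by omega), zeroLoopA_eq,
                List.drop_eq_getElem_cons h, tokensB_cons, hclz]
              have hdrop : (s.drop (i + 1)).drop (innerZerosA s.length s (i + 2) 1) =
                  s.drop (i + 1 + 2 * (innerZerosA s.length s (i + 2) 1 / 2)) := by
                rw [List.drop_drop]; congr 1; omega
              rw [hdrop, List.map_cons, List.flatten_cons, pieceB]
              simp only [if_neg hodd]
              simp [List.append_assoc]
          · rw [dif_neg hz, ih (i + 1) _ (by omega), List.drop_eq_getElem_cons h, tokensB_cons]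
            have hclz : countLeadingZeros (s.drop (i + 1)) = 0 := by
              rw [hd2]; simp [countLeadingZeros, hz]
            rw [hclz]
            simp [pieceB]
      · rw [dif_neg h, List.drop_eq_nil_of_le (by omega)]
        simp [tokensB, tokensBF]

-- ===== VERDICT (by name: the statement is the Claim_ definition above) =====
theorem decode_k8s_sa_spec : Claim_equal_decode_k8s_sa := by
  intro s _
  unfold Spec_decode_k8s_sa decode_k8s_sa decode_k8s_sa_alt
  rw [loopA_eq s.toList.length s.toList 0 [] (by omega)]
  simp
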